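-- pv_equiv track=rewrite | github.com/mosbisu/algorithm | 220402/고정점 찾기.py | fixed_point
-- ===== SOURCE A (Python) =====
-- def fixed_point(lst):
--     low = 0
--     high = len(lst)
--
--     # 결과값 low는 i < low 인 모든 i에 대하여 lst[i] < i
--     while low < high:
--         mid = (low+high) // 2
--
--         if lst[mid] < mid:
--             low = mid + 1
--         else:
--             high = mid
--
--     # 범위를 벗어나거나, 없는 경우.
--     # low는 0에서부터 출발하므로, low < 0인 것은 검사하지 않아도 된다
--     if low >= len(lst) or low != lst[low]:
--         return -1
--     return low
-- ===== SOURCE B (Python) =====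
-- def fixed_point(lst):
--     # Recursive binary search over a (low, size) window instead of A's iterative (low, high) loop.
--     def go(low, size):
--         if size <= 0:
--             return low
--         half = size // 2
--         mid = low + half
--         if lst[mid] < mid:
--             return go(mid + 1, size - half - 1)
--         return go(low, half)
--     low = go(0, len(lst))
--     return low if low < len(lst) and lst[low] == low else -1
-- ===== Notes on version B (the rewrite author's own statement) =====
-- stated objective: alternative
-- what changed: The iterative while-loop binary search over a (low, high) window is replaced by a recursive helper over a (low, size) window representation, with the post-check written positively.
import Mathlib
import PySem

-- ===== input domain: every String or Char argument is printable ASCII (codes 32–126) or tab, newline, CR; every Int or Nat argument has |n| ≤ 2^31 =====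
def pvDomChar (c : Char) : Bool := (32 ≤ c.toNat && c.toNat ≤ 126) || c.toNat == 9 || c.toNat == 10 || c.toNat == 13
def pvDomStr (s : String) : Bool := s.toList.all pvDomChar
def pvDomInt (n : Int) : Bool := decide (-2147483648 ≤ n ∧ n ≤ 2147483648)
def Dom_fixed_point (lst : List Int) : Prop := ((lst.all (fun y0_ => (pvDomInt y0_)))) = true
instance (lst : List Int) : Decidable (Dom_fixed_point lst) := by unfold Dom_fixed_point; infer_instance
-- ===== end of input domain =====

-- B replaces A's iterative (low, high) binary-search loop by a recursive helper over a
-- (low, size) window; same comparison trajectory, so the return value is identical.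

-- ===== PORT A =====
-- the while loop of A; indices mid are always in range, so lst[mid] is ported as pyGetD with an unreachable default
def fpLoopA (lst : List Int) (low high : Int) : Int :=
  if _h : low < high then
    let mid := PySem.Int.floordiv (low + high) 2
    if PySem.List.pyGetD lst mid 0 < mid then fpLoopA lst (mid + 1) high
    else fpLoopA lst low mid
  else low
termination_by (high - low).toNat
decreasing_by
  · have := PySem.Int.floordiv_two_mid_bounds (le_of_lt _h)
    omega
  · have := PySem.Int.floordiv_two_mid_bounds (le_of_lt _h)
    have hlt : PySem.Int.floordiv (low + high) 2 < high := by
      rw [PySem.Int.floordiv_lt_iff_lt_mul (by omega : (0:Int) < 2)]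
      omega
    omega

def fixed_point (lst : List Int) : Int :=
  let low := fpLoopA lst 0 (lst.length : Int)
  if low ≥ (lst.length : Int) ∨ low ≠ PySem.List.pyGetD lst low 0 then -1 else low

-- ===== PORT B =====
-- the recursive helper go of B
def fpGoB (lst : List Int) (low size : Int) : Int :=
  if _h : size ≤ 0 then low
  else
    let half := PySem.Int.floordiv size 2
    let mid := low + half
    if PySem.List.pyGetD lst mid 0 < mid then fpGoB lst (mid + 1) (size - half - 1)
    else fpGoB lst low half
termination_by size.toNat
decreasing_by
  all_goals
    have h0 : (0:Int) ≤ PySem.Int.floordiv size 2 := by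
      rw [PySem.Int.le_floordiv_iff_mul_le (by omega : (0:Int) < 2)]; omega
    have h1 : PySem.Int.floordiv size 2 < size := by
      rw [PySem.Int.floordiv_lt_iff_lt_mul (by omega : (0:Int) < 2)]; omega
    omega

def fixed_point_alt (lst : List Int) : Int :=
  let low := fpGoB lst 0 (lst.length : Int)
  if low < (lst.length : Int) ∧ PySem.List.pyGetD lst low 0 = low then low else -1

-- ===== PRECONDITION & SPEC =====
def Spec_fixed_point (lst : List Int) (out : Int) : Prop := out = fixed_point_alt lst
instance (lst : List Int) (out : Int) : Decidable (Spec_fixed_point lst out) := by unfold Spec_fixed_point; infer_instance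

-- ===== CLAIM (what is proved, stated in full; the proofs are below) =====
def Claim_equal_fixed_point : Prop := ∀ (lst : List Int), Dom_fixed_point lst → Spec_fixed_point lst (fixed_point lst)

-- ===== LEMMAS AND PROOFS =====

-- midpoint decomposition: (low+high)//2 = low + (high-low)//2
theorem fp_mid_eq (low high : Int) :
    PySem.Int.floordiv (low + high) 2 = low + PySem.Int.floordiv (high - low) 2 := by
  rw [PySem.Int.floordiv_eq_iff_of_pos (by omega : (0:Int) < 2)]
  have h := PySem.Int.floordiv_mul_add_mod (high - low) 2
  have hm0 : 0 ≤ PySem.Int.mod (high - low) 2 := by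
    have := PySem.Int.mod_two_eq (high - low); rcases this with h' | h' <;> omega
  have hm1 : PySem.Int.mod (high - low) 2 < 2 := by
    have := PySem.Int.mod_two_eq (high - low); rcases this with h' | h' <;> omega
  constructor <;> nlinarith [h]

-- the two loops agree: fpLoopA on (low, high) = fpGoB on (low, high - low)
theorem fp_loop_eq (lst : List Int) :
    ∀ (n : Nat) (low high : Int), (high - low).toNat = n →
      fpLoopA lst low high = fpGoB lst low (high - low) := by
  intro n
  induction n using Nat.strong_induction_on with
  | _ n ih =>
    intro low high hn
    rw [fpLoopA, fpGoB]
    by_cases h : low < high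
    · have hns : ¬ high - low ≤ 0 := by omega
      simp only [h, hns, dif_pos, dif_neg, not_false_iff]
      have hmid := fp_mid_eq low high
      have hhalf0 : (0:Int) ≤ PySem.Int.floordiv (high - low) 2 := by
        rw [PySem.Int.le_floordiv_iff_mul_le (by omega : (0:Int) < 2)]; omega
      have hhalf1 : PySem.Int.floordiv (high - low) 2 < high - low := by
        rw [PySem.Int.floordiv_lt_iff_lt_mul (by omega : (0:Int) < 2)]; omega
      rw [hmid]
      split
      · have := ih (high - (low + PySem.Int.floordiv (high - low) 2 + 1)).toNat
          (by omega) (low + PySem.Int.floordiv (high - low) 2 + 1) high rfl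
        rw [this]
        congr 1
        omega
      · have := ih ((low + PySem.Int.floordiv (high - low) 2) - low).toNat
          (by omega) low (low + PySem.Int.floordiv (high - low) 2) rfl
        rw [this]
        congr 1
        omega
    · have hns : high - low ≤ 0 := by omega
      simp [h, hns]

-- ===== VERDICT (by name: the statement is the Claim_ definition above) =====
theorem fixed_point_spec : Claim_equal_fixed_point := by
  intro lst _
  unfold Spec_fixed_point fixed_point fixed_point_alt
  rw [fp_loop_eq lst ((lst.length : Int) - 0).toNat 0 (lst.length : Int) rfl]
  simp only [sub_zero]
  set low := fpGoB lst 0 (lst.length : Int) with hlow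
  by_cases h1 : low < (lst.length : Int)
  · by_cases h2 : PySem.List.pyGetD lst low 0 = low
    · simp [h1, h2]
    · have : low ≥ (lst.length : Int) ∨ low ≠ PySem.List.pyGetD lst low 0 := by
        right; exact fun hc => h2 hc.symm
      simp [this, h1, h2]
  · have : low ≥ (lst.length : Int) ∨ low ≠ PySem.List.pyGetD lst low 0 := by left; omega
    simp [this, h1]
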